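-- pv_equiv track=rewrite | github.com/Mercor-Intelligence/archipelago | mcp_servers/looker/mcp_servers/looker/lookml_generator.py | _identify_primary_key
-- ===== SOURCE A (Python) =====
-- def _identify_primary_key(field_names: list[str]) -> str | None:
--     """Identify the primary key field from a list of field names.
--
--     Args:
--         field_names: List of field names (without view prefix)
--
--     Returns:
--         Primary key field name, or None if not found
--     """
--     # Common primary key patterns - exact matches
--     pk_patterns = ["id", "unique_key", "pk", "key"]
--
--     for fname in field_names:
--         fname_lower = fname.lower()
--         if fname_lower in pk_patterns:
--             return fname
--
--     # Look for fields ending with _id - first one is typically the primary key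
--     # e.g., campaign_id for marketing_campaign, event_id for events
--     for fname in field_names:
--         if fname.lower().endswith("_id"):
--             return fname
--
--     return field_names[0] if field_names else None
-- ===== SOURCE B (Python) =====
-- def _identify_primary_key(field_names: list[str]) -> str | None:
--     """Single pass: return the first exact pk-pattern match immediately;
--     otherwise remember the first field ending in _id; fall back to the first field."""
--     pk_patterns = ("id", "unique_key", "pk", "key")
--     id_candidate = None
--     for fname in field_names:
--         fname_lower = fname.lower()
--         if fname_lower in pk_patterns:
--             return fname
--         if id_candidate is None and fname_lower.endswith("_id"):
--             id_candidate = fname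
--     if id_candidate is not None:
--         return id_candidate
--     return field_names[0] if field_names else None
-- ===== Notes on version B (the rewrite author's own statement) =====
-- stated objective: simpler
-- what changed: Replaces A's two sequential scans (exact pattern pass, then _id-suffix pass) with a single pass that returns exact matches immediately and records the first _id candidate in one accumulator.
import Mathlib
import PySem

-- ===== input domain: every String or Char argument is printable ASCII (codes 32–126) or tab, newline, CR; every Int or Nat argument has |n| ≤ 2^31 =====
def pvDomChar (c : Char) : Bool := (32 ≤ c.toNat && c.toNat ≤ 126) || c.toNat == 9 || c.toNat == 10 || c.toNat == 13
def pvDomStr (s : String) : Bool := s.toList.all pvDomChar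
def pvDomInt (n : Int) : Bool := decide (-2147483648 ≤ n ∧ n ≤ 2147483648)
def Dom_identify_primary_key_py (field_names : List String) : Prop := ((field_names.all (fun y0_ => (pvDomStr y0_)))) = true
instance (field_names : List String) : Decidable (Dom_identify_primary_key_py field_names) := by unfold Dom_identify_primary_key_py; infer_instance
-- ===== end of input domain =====

-- B replaces A's two sequential scans with one single pass keeping a first-_id candidate; same result, proved equal on all inputs.


-- ===== PORT A =====
def pkPatterns : List String := ["id", "unique_key", "pk", "key"]

-- first loop of A: first field whose lowercase form is an exact pk pattern
def pkLoop1 : List String → Option String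
  | [] => none
  | fname :: rest =>
      if pkPatterns.contains (PySem.Str.lower fname) then some fname else pkLoop1 rest

-- second loop of A: first field whose lowercase form ends with "_id"
def pkLoop2 : List String → Option String
  | [] => none
  | fname :: rest =>
      if PySem.Str.endswith (PySem.Str.lower fname) "_id" then some fname else pkLoop2 rest

def identify_primary_key_py (field_names : List String) : Option String :=
  match pkLoop1 field_names with
  | some f => some f
  | none =>
    match pkLoop2 field_names with
    | some f => some f
    | none => field_names.head?   -- field_names[0] if field_names else None

-- ===== PORT B =====
-- single pass: return exact pattern match at once, else carry the first _id candidate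
def pkGo : List String → Option String → Option String
  | [], cand => cand
  | fname :: rest, cand =>
      let fl := PySem.Str.lower fname
      if pkPatterns.contains fl then some fname
      else if cand.isNone && PySem.Str.endswith fl "_id" then pkGo rest (some fname)
      else pkGo rest cand

def identify_primary_key_py_alt (field_names : List String) : Option String :=
  match pkGo field_names none with
  | some f => some f
  | none => field_names.head?

-- ===== PRECONDITION & SPEC =====
def Spec_identify_primary_key_py (field_names : List String) (out : Option String) : Prop := out = identify_primary_key_py_alt field_names
instance (field_names : List String) (out : Option String) : Decidable (Spec_identify_primary_key_py field_names out) := by unfold Spec_identify_primary_key_py; infer_instance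

-- ===== CLAIM (what is proved, stated in full; the proofs are below) =====
def Claim_equal_identify_primary_key_py : Prop := ∀ (field_names : List String), Dom_identify_primary_key_py field_names → Spec_identify_primary_key_py field_names (identify_primary_key_py field_names)

-- ===== LEMMAS AND PROOFS =====
-- invariant of B's single pass relating it to A's two loops
theorem pkGo_eq (l : List String) (cand : Option String) :
    pkGo l cand =
      match pkLoop1 l with
      | some f => some f
      | none => match cand with
                | some c => some c
                | none => pkLoop2 l := by
  induction l generalizing cand with
  | nil => cases cand <;> simp [pkGo, pkLoop1, pkLoop2]
  | cons fname rest ih =>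
      simp only [pkGo, pkLoop1, pkLoop2]
      by_cases hp : PySem.Str.lower fname ∈ pkPatterns
      · simp [hp]
      · by_cases he : PySem.Str.endswith (PySem.Str.lower fname) "_id"
        · cases cand <;> simp [hp, ih] <;> cases pkLoop1 rest <;> simp
        · cases cand <;> simp [hp, ih] <;> cases pkLoop1 rest <;> simp

-- ===== VERDICT (by name: the statement is the Claim_ definition above) =====
theorem identify_primary_key_py_spec : Claim_equal_identify_primary_key_py := by
  intro field_names _
  unfold Spec_identify_primary_key_py identify_primary_key_py identify_primary_key_py_alt
  rw [pkGo_eq]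
  cases pkLoop1 field_names <;> cases h2 : pkLoop2 field_names <;> simp
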